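-- pv_equiv track=rewrite | github.com/Mao-beta/AtCoder | ABC/ABC347/ABC347F.py | accum_max
-- ===== SOURCE A (Python) =====
-- def accum_max(X, n):
--     for i in range(n-1):
--         for j in range(n):
--             X[i+1][j] = max(X[i+1][j], X[i][j])
--     for i in range(n):
--         for j in range(n-1):
--             X[i][j+1] = max(X[i][j], X[i][j+1])
--     return X
-- ===== SOURCE B (Python) =====
-- def accum_max(X, n):
--     for i in range(n):
--         for j in range(n):
--             if i == 0 and j == 0:
--                 continue  # no neighbour: nothing to do
--             v = X[i][j]
--             if i > 0:
--                 v = max(v, X[i - 1][j])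
--             if j > 0:
--                 v = max(v, X[i][j - 1])
--             X[i][j] = v
--     return X
-- ===== Notes on version B (the rewrite author's own statement) =====
-- stated objective: alternative
-- what changed: Fuses A's two separate sweeps (column prefix maxima, then row prefix maxima) into a single row-major pass that sets each cell to the max of itself and its already-finished top and left neighbours, skipping (0,0) which has no neighbours.
import Mathlib
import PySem

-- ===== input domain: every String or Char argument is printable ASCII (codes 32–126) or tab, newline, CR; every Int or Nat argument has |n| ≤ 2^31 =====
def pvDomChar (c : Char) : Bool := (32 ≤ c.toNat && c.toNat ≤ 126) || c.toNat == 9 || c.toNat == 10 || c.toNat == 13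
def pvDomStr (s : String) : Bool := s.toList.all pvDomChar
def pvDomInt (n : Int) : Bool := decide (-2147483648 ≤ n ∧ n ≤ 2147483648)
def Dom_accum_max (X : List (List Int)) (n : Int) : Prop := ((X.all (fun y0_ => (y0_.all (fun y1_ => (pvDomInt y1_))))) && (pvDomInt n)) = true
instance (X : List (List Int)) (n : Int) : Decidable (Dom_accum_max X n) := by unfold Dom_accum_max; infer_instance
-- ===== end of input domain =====

-- B fuses A's two sweeps into one row-major pass (standard 2D prefix-max recurrence, skipping
-- the neighbourless cell (0,0)); both Pythons mutate X in place identically, the equivalence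
-- proved here is about the return value.

-- ===== PORT A =====
-- pyGetD/pySetD are exact here: Pre_accum_max keeps every index A uses in range.
def accum_max (X : List (List Int)) (n : Int) : List (List Int) :=
  let X1 := (PySem.List.pyRange 0 (n - 1) 1).foldl (fun Y i =>
    (PySem.List.pyRange 0 n 1).foldl (fun Y j =>
      PySem.List.pySetD Y (i + 1)
        (PySem.List.pySetD (PySem.List.pyGetD Y (i + 1) []) j
          (max (PySem.List.pyGetD (PySem.List.pyGetD Y (i + 1) []) j 0)
               (PySem.List.pyGetD (PySem.List.pyGetD Y i []) j 0)))) Y) X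
  (PySem.List.pyRange 0 n 1).foldl (fun Y i =>
    (PySem.List.pyRange 0 (n - 1) 1).foldl (fun Y j =>
      PySem.List.pySetD Y i
        (PySem.List.pySetD (PySem.List.pyGetD Y i []) (j + 1)
          (max (PySem.List.pyGetD (PySem.List.pyGetD Y i []) j 0)
               (PySem.List.pyGetD (PySem.List.pyGetD Y i []) (j + 1) 0)))) Y) X1

-- ===== PORT B =====
-- pyGetD/pySetD are exact here: Pre_accum_max keeps every index B uses in range.
def accum_max_alt (X : List (List Int)) (n : Int) : List (List Int) :=
  (PySem.List.pyRange 0 n 1).foldl (fun Y i =>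
    (PySem.List.pyRange 0 n 1).foldl (fun Y j =>
      if i = 0 ∧ j = 0 then Y     -- 'continue': no neighbour, nothing to do
      else
        let v := PySem.List.pyGetD (PySem.List.pyGetD Y i []) j 0
        let v := if 0 < i then max v (PySem.List.pyGetD (PySem.List.pyGetD Y (i - 1) []) j 0) else v
        let v := if 0 < j then max v (PySem.List.pyGetD (PySem.List.pyGetD Y i []) (j - 1) 0) else v
        PySem.List.pySetD Y i (PySem.List.pySetD (PySem.List.pyGetD Y i []) j v)) Y) X

-- ===== PRECONDITION & SPEC =====
-- Pre_ excludes exactly the inputs on which BOTH Pythons raise IndexError: n ≥ 2 with the n×n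
-- top-left block of X not fully present (for n ≤ 1 neither program indexes into X at all).
def Pre_accum_max (X : List (List Int)) (n : Int) : Prop :=
  n ≤ 1 ∨ (n ≤ (X.length : Int) ∧ ∀ r ∈ X.take n.toNat, n ≤ (r.length : Int))
instance (X : List (List Int)) (n : Int) : Decidable (Pre_accum_max X n) := by
  unfold Pre_accum_max; infer_instance

def pvWitness_accum_max : List (List Int) × Int := ([[3, 1], [0, 2]], 2)

def Spec_accum_max (X : List (List Int)) (n : Int) (out : List (List Int)) : Prop := out = accum_max_alt X n
instance (X : List (List Int)) (n : Int) (out : List (List Int)) : Decidable (Spec_accum_max X n out) := by unfold Spec_accum_max; infer_instance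

-- ===== CLAIM (what is proved, stated in full; the proofs are below) =====
def Claim_equal_accum_max : Prop := ∀ (X : List (List Int)) (n : Int), Dom_accum_max X n → Pre_accum_max X n → Spec_accum_max X n (accum_max X n)

-- ===== LEMMAS AND PROOFS =====

-- Nat-indexed grid read/write used by the proofs (the ports are rewritten into these).
def g2 (X : List (List Int)) (i j : Nat) : Int := (X.getD i []).getD j 0
def s2 (X : List (List Int)) (i j : Nat) (v : Int) : List (List Int) :=
  X.set i ((X.getD i []).set j v)

-- column prefix maximum (A's first sweep) and running row maximum
def cmax (g : Nat → Nat → Int) : Nat → Nat → Int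
  | 0, j => g 0 j
  | i + 1, j => max (g (i + 1) j) (cmax g i j)

def rmax (h : Nat → Int) : Nat → Int
  | 0 => h 0
  | j + 1 => max (rmax h j) (h (j + 1))

-- 2D prefix maximum
def pm (g : Nat → Nat → Int) (i j : Nat) : Int := rmax (fun j' => cmax g i j') j

def shapeEq (Y X : List (List Int)) : Prop :=
  Y.length = X.length ∧ ∀ a, (Y.getD a []).length = (X.getD a []).length

-- Nat-indexed transliterations of the two ports
def aNat (X : List (List Int)) (N : Nat) : List (List Int) :=
  let X1 := (List.range (N - 1)).foldl (fun Y i =>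
    (List.range N).foldl (fun Y j =>
      s2 Y (i + 1) j (max (g2 Y (i + 1) j) (g2 Y i j))) Y) X
  (List.range N).foldl (fun Y i =>
    (List.range (N - 1)).foldl (fun Y j =>
      s2 Y i (j + 1) (max (g2 Y i j) (g2 Y i (j + 1)))) Y) X1

def bNat (X : List (List Int)) (N : Nat) : List (List Int) :=
  (List.range N).foldl (fun Y i =>
    (List.range N).foldl (fun Y j =>
      if i = 0 ∧ j = 0 then Y
      else
        let v := g2 Y i j
        let v := if 0 < i then max v (g2 Y (i - 1) j) else v
        let v := if 0 < j then max v (g2 Y i (j - 1)) else v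
        s2 Y i j v) Y) X

lemma port_a_eq (X : List (List Int)) (n : Int) : accum_max X n = aNat X n.toNat := by
  unfold accum_max aNat
  have hN1 : (n - 1).toNat = n.toNat - 1 := by omega
  simp only [PySem.List.pyRange_one, List.foldl_map, zero_add, Int.sub_zero, hN1]
  congr 1
  · funext Y k
    congr 1
    funext Z j
    rw [show ((j : Int) + 1) = ((j + 1 : Nat) : Int) by push_cast; ring]
    simp only [PySem.List.pySetD_natCast, PySem.List.pyGetD_natCast, s2, g2,
      List.getD_eq_getElem?_getD]
  · congr 1
    funext Y k
    congr 1
    funext Z j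
    rw [show ((k : Int) + 1) = ((k + 1 : Nat) : Int) by push_cast; ring]
    simp only [PySem.List.pySetD_natCast, PySem.List.pyGetD_natCast, s2, g2,
      List.getD_eq_getElem?_getD]

lemma port_b_eq (X : List (List Int)) (n : Int) : accum_max_alt X n = bNat X n.toNat := by
  unfold accum_max_alt bNat
  simp only [PySem.List.pyRange_one, List.foldl_map, zero_add, Int.sub_zero]
  congr 1
  funext Y k
  congr 1
  funext Z j
  have hcast : ((k : Int) = 0 ∧ (j : Int) = 0) ↔ (k = 0 ∧ j = 0) := by
    constructor <;> (intro h; exact ⟨by omega, by omega⟩)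
  by_cases h0 : k = 0 ∧ j = 0
  · rw [if_pos (hcast.mpr h0), if_pos h0]
  · rw [if_neg (fun hc => h0 (hcast.mp hc)), if_neg h0]
    simp only [s2, g2, PySem.List.pySetD_natCast, PySem.List.pyGetD_natCast, Nat.cast_pos,
      List.getD_eq_getElem?_getD]
    by_cases hk : 0 < k
    · by_cases hj : 0 < j
      · rw [show ((k : Int) - 1) = ((k - 1 : Nat) : Int) from by omega,
          show ((j : Int) - 1) = ((j - 1 : Nat) : Int) from by omega]
        simp only [hk, hj, if_true, PySem.List.pyGetD_natCast, List.getD_eq_getElem?_getD]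
      · rw [show ((k : Int) - 1) = ((k - 1 : Nat) : Int) from by omega]
        simp only [hk, hj, if_true, if_false, PySem.List.pyGetD_natCast, List.getD_eq_getElem?_getD]
    · by_cases hj : 0 < j
      · rw [show ((j : Int) - 1) = ((j - 1 : Nat) : Int) from by omega]
        simp only [hk, hj, if_true, if_false, PySem.List.pyGetD_natCast, List.getD_eq_getElem?_getD]
      · simp only [hk, hj, if_false]

lemma shapeEq_refl (X : List (List Int)) : shapeEq X X := ⟨rfl, fun _ => rfl⟩

lemma shapeEq_trans {Z Y X : List (List Int)} (h1 : shapeEq Z Y) (h2 : shapeEq Y X) : shapeEq Z X :=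
  ⟨h1.1.trans h2.1, fun a => (h1.2 a).trans (h2.2 a)⟩

lemma shapeEq_s2 (X : List (List Int)) (i j : Nat) (v : Int) : shapeEq (s2 X i j v) X := by
  refine ⟨by simp [s2], ?_⟩
  intro a
  simp only [s2, List.getD_eq_getElem?_getD, List.getElem?_set]
  by_cases h : i = a
  · subst h
    by_cases hl : i < X.length
    · simp [hl]
    · simp [hl]
  · simp [h]

lemma g2_s2 (X : List (List Int)) (p q : Nat) (v : Int) (hp : p < X.length)
    (hq : q < (X.getD p []).length) (a b : Nat) :
    g2 (s2 X p q v) a b = if a = p ∧ b = q then v else g2 X a b := by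
  simp only [g2, s2, List.getD_eq_getElem?_getD, List.getElem?_set]
  by_cases hap : p = a
  · subst hap
    simp only [if_pos hp]
    by_cases hbq : b = q
    · subst hbq
      have hq' : b < (X[p]?.getD []).length := by
        rwa [← List.getD_eq_getElem?_getD]
      simp [List.getElem?_set_self hq']
    · simp [List.getElem?_set_ne (fun h : q = b => hbq h.symm), hbq]
  · rw [if_neg hap, if_neg (fun hc : a = p ∧ b = q => hap hc.1.symm)]

lemma le_rmax_self (h : Nat → Int) (b : Nat) : h b ≤ rmax h b := by
  cases b with
  | zero => simp [rmax]
  | succ b => simp [rmax]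

lemma rmax_mono (h h' : Nat → Int) (b : Nat) (hle : ∀ j, j ≤ b → h j ≤ h' j) :
    rmax h b ≤ rmax h' b := by
  induction b with
  | zero => simpa [rmax] using hle 0 (le_refl 0)
  | succ b ih =>
    simp only [rmax]
    exact max_le_max (ih fun j hj => hle j (hj.trans (Nat.le_succ b))) (hle _ le_rfl)

lemma rmax_congr (h h' : Nat → Int) (b : Nat) (hle : ∀ j, j ≤ b → h j = h' j) :
    rmax h b = rmax h' b :=
  le_antisymm (rmax_mono h h' b fun j hj => (hle j hj).le)
    (rmax_mono h' h b fun j hj => (hle j hj).ge)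

lemma cmax_le_succ (g : Nat → Nat → Int) (i j : Nat) : cmax g i j ≤ cmax g (i + 1) j := by
  simp [cmax]

-- the fused recurrence B uses, proved about the 2D prefix maximum
lemma pm_step (g : Nat → Nat → Int) (i m : Nat) :
    pm g i m =
      (let v := g i m
       let v := if 0 < i then max v (pm g (i - 1) m) else v
       if 0 < m then max v (pm g i (m - 1)) else v) := by
  cases i with
  | zero =>
    cases m with
    | zero => simp [pm, rmax, cmax]
    | succ m' =>
      simp only [Nat.lt_irrefl, if_false, Nat.succ_pos, if_true, Nat.succ_sub_one]
      have e : pm g 0 (m' + 1) = max (pm g 0 m') (g 0 (m' + 1)) := rfl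
      rw [e, max_comm]
  | succ i' =>
    cases m with
    | zero =>
      simp only [Nat.succ_pos, if_true, Nat.lt_irrefl, if_false, Nat.succ_sub_one]
      rfl
    | succ m' =>
      simp only [Nat.succ_pos, if_true, Nat.succ_sub_one]
      have e1 : pm g (i' + 1) (m' + 1) =
          max (pm g (i' + 1) m') (max (g (i' + 1) (m' + 1)) (cmax g i' (m' + 1))) := rfl
      have h1 : cmax g i' (m' + 1) ≤ pm g i' (m' + 1) :=
        le_rmax_self (fun j' => cmax g i' j') (m' + 1)
      have h2 : pm g i' (m' + 1) ≤ max (pm g (i' + 1) m') (cmax g i' (m' + 1)) := by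
        have hm : rmax (fun j' => cmax g i' j') m' ≤ rmax (fun j' => cmax g (i' + 1) j') m' :=
          rmax_mono _ _ _ (fun j _ => cmax_le_succ g i' j)
        have e2 : pm g i' (m' + 1) =
            max (rmax (fun j' => cmax g i' j') m') (cmax g i' (m' + 1)) := rfl
        rw [e2]
        exact max_le_max hm le_rfl
      rw [e1]
      omega

-- ===== A's first sweep =====

lemma colpass_inv (Y : List (List Int)) (N i : Nat) (hY : N ≤ Y.length ∧ ∀ a < N, N ≤ (Y.getD a []).length)
    (hi : i + 1 < N) (k : Nat) (hk : k ≤ N) :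
    shapeEq ((List.range k).foldl (fun Y j => s2 Y (i + 1) j (max (g2 Y (i + 1) j) (g2 Y i j))) Y) Y ∧
    ∀ a b, g2 ((List.range k).foldl (fun Y j => s2 Y (i + 1) j (max (g2 Y (i + 1) j) (g2 Y i j))) Y) a b =
      if a = i + 1 ∧ b < k then max (g2 Y (i + 1) b) (g2 Y i b) else g2 Y a b := by
  induction k with
  | zero => exact ⟨shapeEq_refl Y, fun a b => by simp⟩
  | succ k ih =>
    obtain ⟨hs, hg⟩ := ih (by omega)
    rw [List.range_succ, List.foldl_append, List.foldl_cons, List.foldl_nil]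
    set Zk := (List.range k).foldl (fun Y j => s2 Y (i + 1) j (max (g2 Y (i + 1) j) (g2 Y i j))) Y with hZdef
    have hl1 : Zk.length = Y.length := hs.1
    have hlen : i + 1 < Zk.length := by omega
    have hrow : k < (Zk.getD (i + 1) []).length := by
      have h2 := hY.2 (i + 1) hi
      have h3 := hs.2 (i + 1)
      omega
    refine ⟨shapeEq_trans (shapeEq_s2 _ _ _ _) hs, fun a b => ?_⟩
    rw [g2_s2 Zk (i + 1) k _ hlen hrow, hg (i + 1) k, hg i k, hg a b,
      if_neg (by omega : ¬(i + 1 = i + 1 ∧ k < k)), if_neg (by omega : ¬(i = i + 1 ∧ k < k))]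
    by_cases h1 : a = i + 1
    · subst h1
      by_cases h2 : b = k
      · subst h2
        rw [if_pos ⟨rfl, rfl⟩, if_pos ⟨rfl, by omega⟩]
      · rw [if_neg (fun hc => h2 hc.2)]
        by_cases h3 : b < k
        · rw [if_pos ⟨rfl, h3⟩, if_pos ⟨rfl, by omega⟩]
        · rw [if_neg (fun hc => h3 hc.2), if_neg (by omega : ¬(i + 1 = i + 1 ∧ b < k + 1))]
    · rw [if_neg (fun hc => h1 hc.1), if_neg (fun hc => h1 hc.1), if_neg (fun hc => h1 hc.1)]

lemma colsweep_inv (X : List (List Int)) (N : Nat)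
    (hX : N ≤ X.length ∧ ∀ a < N, N ≤ (X.getD a []).length) (k : Nat) (hk : k ≤ N - 1) :
    shapeEq ((List.range k).foldl (fun Y i =>
      (List.range N).foldl (fun Y j => s2 Y (i + 1) j (max (g2 Y (i + 1) j) (g2 Y i j))) Y) X) X ∧
    ∀ a b, g2 ((List.range k).foldl (fun Y i =>
      (List.range N).foldl (fun Y j => s2 Y (i + 1) j (max (g2 Y (i + 1) j) (g2 Y i j))) Y) X) a b =
      if a ≤ k ∧ b < N then cmax (g2 X) a b else g2 X a b := by
  induction k with
  | zero =>
    refine ⟨shapeEq_refl X, fun a b => ?_⟩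
    simp only [List.range_zero, List.foldl_nil]
    by_cases h : a ≤ 0 ∧ b < N
    · have ha : a = 0 := by omega
      subst ha
      rw [if_pos h]
      rfl
    · rw [if_neg h]
  | succ k ih =>
    obtain ⟨hs, hg⟩ := ih (by omega)
    rw [List.range_succ, List.foldl_append, List.foldl_cons, List.foldl_nil]
    set Ck := (List.range k).foldl (fun Y i =>
      (List.range N).foldl (fun Y j => s2 Y (i + 1) j (max (g2 Y (i + 1) j) (g2 Y i j))) Y) X with hCdef
    have hC : N ≤ Ck.length ∧ ∀ a < N, N ≤ (Ck.getD a []).length := by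
      refine ⟨by have := hs.1; omega, fun a ha => ?_⟩
      have := hs.2 a
      have := hX.2 a ha
      omega
    obtain ⟨hs2, hg2⟩ := colpass_inv Ck N k hC (by omega) N le_rfl
    refine ⟨shapeEq_trans hs2 hs, fun a b => ?_⟩
    rw [hg2 a b]
    by_cases h1 : a = k + 1
    · subst h1
      by_cases h2 : b < N
      · rw [if_pos ⟨rfl, h2⟩, hg (k + 1) b, hg k b, if_neg (by omega : ¬(k + 1 ≤ k ∧ b < N)),
          if_pos ⟨le_rfl, h2⟩, if_pos ⟨le_rfl, h2⟩]
        rfl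
      · rw [if_neg (fun hc => h2 hc.2), hg (k + 1) b, if_neg (by omega : ¬(k + 1 ≤ k ∧ b < N)),
          if_neg (fun hc => h2 hc.2)]
    · rw [if_neg (fun hc => h1 hc.1), hg a b]
      by_cases h2 : a ≤ k ∧ b < N
      · rw [if_pos h2, if_pos ⟨by omega, h2.2⟩]
      · rw [if_neg h2, if_neg (by omega : ¬(a ≤ k + 1 ∧ b < N))]

-- ===== A's second sweep =====

lemma rowpass_inv (Y : List (List Int)) (N i : Nat) (hY : N ≤ Y.length ∧ ∀ a < N, N ≤ (Y.getD a []).length)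
    (hi : i < N) (k : Nat) (hk : k ≤ N - 1) :
    shapeEq ((List.range k).foldl (fun Y j => s2 Y i (j + 1) (max (g2 Y i j) (g2 Y i (j + 1)))) Y) Y ∧
    ∀ a b, g2 ((List.range k).foldl (fun Y j => s2 Y i (j + 1) (max (g2 Y i j) (g2 Y i (j + 1)))) Y) a b =
      if a = i ∧ b ≤ k then rmax (fun j => g2 Y i j) b else g2 Y a b := by
  induction k with
  | zero =>
    refine ⟨shapeEq_refl Y, fun a b => ?_⟩
    simp only [List.range_zero, List.foldl_nil]
    by_cases h : a = i ∧ b ≤ 0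
    · obtain ⟨ha, hb⟩ := h
      have hb0 : b = 0 := by omega
      subst ha; subst hb0
      rw [if_pos ⟨rfl, le_rfl⟩]
      rfl
    · rw [if_neg h]
  | succ k ih =>
    obtain ⟨hs, hg⟩ := ih (by omega)
    rw [List.range_succ, List.foldl_append, List.foldl_cons, List.foldl_nil]
    set Zk := (List.range k).foldl (fun Y j => s2 Y i (j + 1) (max (g2 Y i j) (g2 Y i (j + 1)))) Y with hZdef
    have hlen : i < Zk.length := by have := hs.1; have := hY.1; omega
    have hrow : k + 1 < (Zk.getD i []).length := by
      have h2 := hY.2 i hi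
      have h3 := hs.2 i
      omega
    refine ⟨shapeEq_trans (shapeEq_s2 _ _ _ _) hs, fun a b => ?_⟩
    rw [g2_s2 Zk i (k + 1) _ hlen hrow, hg i k, hg i (k + 1), hg a b,
      if_pos (⟨rfl, le_rfl⟩ : i = i ∧ k ≤ k), if_neg (by omega : ¬(i = i ∧ k + 1 ≤ k))]
    by_cases h1 : a = i
    · subst h1
      by_cases h2 : b = k + 1
      · subst h2
        rw [if_pos ⟨rfl, rfl⟩, if_pos ⟨rfl, by omega⟩]
        rfl
      · rw [if_neg (fun hc => h2 hc.2)]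
        by_cases h3 : b ≤ k
        · rw [if_pos ⟨rfl, h3⟩, if_pos ⟨rfl, by omega⟩]
        · rw [if_neg (fun hc => h3 hc.2), if_neg (by omega : ¬(a = a ∧ b ≤ k + 1))]
    · rw [if_neg (fun hc => h1 hc.1), if_neg (fun hc => h1 hc.1), if_neg (fun hc => h1 hc.1)]

lemma rowsweep_inv (C : List (List Int)) (N : Nat)
    (hC : N ≤ C.length ∧ ∀ a < N, N ≤ (C.getD a []).length) (k : Nat) (hk : k ≤ N) :
    shapeEq ((List.range k).foldl (fun Y i =>
      (List.range (N - 1)).foldl (fun Y j => s2 Y i (j + 1) (max (g2 Y i j) (g2 Y i (j + 1)))) Y) C) C ∧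
    ∀ a b, g2 ((List.range k).foldl (fun Y i =>
      (List.range (N - 1)).foldl (fun Y j => s2 Y i (j + 1) (max (g2 Y i j) (g2 Y i (j + 1)))) Y) C) a b =
      if a < k ∧ b < N then rmax (fun j => g2 C a j) b else g2 C a b := by
  induction k with
  | zero => exact ⟨shapeEq_refl C, fun a b => by simp⟩
  | succ k ih =>
    obtain ⟨hs, hg⟩ := ih (by omega)
    rw [List.range_succ, List.foldl_append, List.foldl_cons, List.foldl_nil]
    set Rk := (List.range k).foldl (fun Y i =>
      (List.range (N - 1)).foldl (fun Y j => s2 Y i (j + 1) (max (g2 Y i j) (g2 Y i (j + 1)))) Y) C with hRdef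
    have hR : N ≤ Rk.length ∧ ∀ a < N, N ≤ (Rk.getD a []).length := by
      refine ⟨by have := hs.1; omega, fun a ha => ?_⟩
      have := hs.2 a
      have := hC.2 a ha
      omega
    obtain ⟨hs2, hg2⟩ := rowpass_inv Rk N k hR (by omega) (N - 1) le_rfl
    have hrowk : ∀ j, g2 Rk k j = g2 C k j := fun j => by
      rw [hg k j, if_neg (by omega : ¬(k < k ∧ j < N))]
    have hrmax : ∀ b, rmax (fun j => g2 Rk k j) b = rmax (fun j => g2 C k j) b := fun b =>
      rmax_congr _ _ b (fun j _ => hrowk j)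
    refine ⟨shapeEq_trans hs2 hs, fun a b => ?_⟩
    rw [hg2 a b]
    by_cases h1 : a = k
    · subst h1
      by_cases h2 : b < N
      · rw [if_pos ⟨rfl, by omega⟩, hrmax b, if_pos ⟨by omega, h2⟩]
      · rw [if_neg (by omega : ¬(a = a ∧ b ≤ N - 1)), hg a b,
          if_neg (by omega : ¬(a < a ∧ b < N)), if_neg (fun hc => h2 hc.2)]
    · rw [if_neg (fun hc => h1 hc.1), hg a b]
      by_cases h2 : a < k ∧ b < N
      · rw [if_pos h2, if_pos ⟨by omega, h2.2⟩]
      · rw [if_neg h2, if_neg (by omega : ¬(a < k + 1 ∧ b < N))]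

lemma aNat_char (X : List (List Int)) (N : Nat)
    (hX : N ≤ X.length ∧ ∀ a < N, N ≤ (X.getD a []).length) (hN : 1 ≤ N) :
    shapeEq (aNat X N) X ∧ ∀ a b, g2 (aNat X N) a b =
      if a < N ∧ b < N then pm (g2 X) a b else g2 X a b := by
  have hdef : aNat X N = (List.range N).foldl (fun Y i =>
      (List.range (N - 1)).foldl (fun Y j => s2 Y i (j + 1) (max (g2 Y i j) (g2 Y i (j + 1)))) Y)
      ((List.range (N - 1)).foldl (fun Y i =>
      (List.range N).foldl (fun Y j => s2 Y (i + 1) j (max (g2 Y (i + 1) j) (g2 Y i j))) Y) X) := rfl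
  rw [hdef]
  obtain ⟨hs1, hg1⟩ := colsweep_inv X N hX (N - 1) le_rfl
  set C := (List.range (N - 1)).foldl (fun Y i =>
      (List.range N).foldl (fun Y j => s2 Y (i + 1) j (max (g2 Y (i + 1) j) (g2 Y i j))) Y) X with hCdef
  have hC : N ≤ C.length ∧ ∀ a < N, N ≤ (C.getD a []).length := by
    refine ⟨by have := hs1.1; omega, fun a ha => ?_⟩
    have := hs1.2 a
    have := hX.2 a ha
    omega
  obtain ⟨hs2, hg2⟩ := rowsweep_inv C N hC N le_rfl
  refine ⟨shapeEq_trans hs2 hs1, fun a b => ?_⟩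
  rw [hg2 a b]
  by_cases h : a < N ∧ b < N
  · rw [if_pos h, if_pos h]
    unfold pm
    refine rmax_congr _ _ b (fun j hj => ?_)
    rw [hg1 a j, if_pos ⟨by omega, by omega⟩]
  · rw [if_neg h, if_neg h, hg1 a b, if_neg (by omega : ¬(a ≤ N - 1 ∧ b < N))]

-- ===== B's fused pass =====

lemma b_inner_inv (X Y : List (List Int)) (N i : Nat)
    (hX : N ≤ X.length ∧ ∀ a < N, N ≤ (X.getD a []).length)
    (hsh : shapeEq Y X) (hi : i < N)
    (hY : ∀ a b, g2 Y a b = if a < i ∧ b < N then pm (g2 X) a b else g2 X a b)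
    (m : Nat) (hm : m ≤ N) :
    shapeEq ((List.range m).foldl (fun Y j =>
      if i = 0 ∧ j = 0 then Y
      else
        let v := g2 Y i j
        let v := if 0 < i then max v (g2 Y (i - 1) j) else v
        let v := if 0 < j then max v (g2 Y i (j - 1)) else v
        s2 Y i j v) Y) X ∧
    ∀ a b, g2 ((List.range m).foldl (fun Y j =>
      if i = 0 ∧ j = 0 then Y
      else
        let v := g2 Y i j
        let v := if 0 < i then max v (g2 Y (i - 1) j) else v
        let v := if 0 < j then max v (g2 Y i (j - 1)) else v
        s2 Y i j v) Y) a b =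
      if (a < i ∧ b < N) ∨ (a = i ∧ b < m) then pm (g2 X) a b else g2 X a b := by
  induction m with
  | zero =>
    refine ⟨hsh, fun a b => ?_⟩
    simp only [List.range_zero, List.foldl_nil, Nat.not_lt_zero, and_false, or_false]
    exact hY a b
  | succ m ih =>
    obtain ⟨hs, hg⟩ := ih (by omega)
    simp only [List.range_succ, List.foldl_append, List.foldl_cons, List.foldl_nil]
    set Zm := (List.range m).foldl (fun Y j =>
      if i = 0 ∧ j = 0 then Y
      else
        let v := g2 Y i j
        let v := if 0 < i then max v (g2 Y (i - 1) j) else v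
        let v := if 0 < j then max v (g2 Y i (j - 1)) else v
        s2 Y i j v) Y with hZdef
    by_cases hskip : i = 0 ∧ m = 0
    · obtain ⟨hi0, hm0⟩ := hskip
      subst hi0; subst hm0
      rw [if_pos ⟨rfl, rfl⟩]
      refine ⟨hs, fun a b => ?_⟩
      rw [hg a b]
      by_cases h : (a < 0 ∧ b < N) ∨ (a = 0 ∧ b < 0)
      · rw [if_pos h, if_pos (by omega : (a < 0 ∧ b < N) ∨ (a = 0 ∧ b < 0 + 1))]
      · rw [if_neg h]
        by_cases h2 : (a < 0 ∧ b < N) ∨ (a = 0 ∧ b < 0 + 1)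
        · have ha : a = 0 := by omega
          have hb : b = 0 := by omega
          subst ha; subst hb
          rw [if_pos h2]
          have : pm (g2 X) 0 0 = g2 X 0 0 := by simp [pm, rmax, cmax]
          rw [this]
        · rw [if_neg h2]
    · rw [if_neg hskip]
      have hlen : i < Zm.length := by have := hs.1; have := hX.1; omega
      have hrow : m < (Zm.getD i []).length := by
        have h2 := hX.2 i hi
        have h3 := hs.2 i
        omega
      refine ⟨shapeEq_trans (shapeEq_s2 _ _ _ _) hs, fun a b => ?_⟩
      rw [g2_s2 Zm i m _ hlen hrow]
      by_cases h : a = i ∧ b = m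
      · obtain ⟨ha, hb⟩ := h
        subst ha
        subst hb
        rw [if_pos ⟨rfl, rfl⟩, if_pos (Or.inr ⟨rfl, by omega⟩), pm_step (g2 X) a b]
        by_cases hi0 : 0 < a
        · by_cases hm0 : 0 < b
          · simp only [hi0, hm0, if_true]
            rw [hg a b, if_neg (by omega : ¬((a < a ∧ b < N) ∨ (a = a ∧ b < b))),
              hg (a - 1) b, if_pos (Or.inl ⟨by omega, by omega⟩),
              hg a (b - 1), if_pos (Or.inr ⟨rfl, by omega⟩)]
          · simp only [hi0, hm0, if_true, if_false]
            rw [hg a b, if_neg (by omega : ¬((a < a ∧ b < N) ∨ (a = a ∧ b < b))),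
              hg (a - 1) b, if_pos (Or.inl ⟨by omega, by omega⟩)]
        · by_cases hm0 : 0 < b
          · simp only [hi0, hm0, if_true, if_false]
            rw [hg a b, if_neg (by omega : ¬((a < a ∧ b < N) ∨ (a = a ∧ b < b))),
              hg a (b - 1), if_pos (Or.inr ⟨rfl, by omega⟩)]
          · exact absurd ⟨by omega, by omega⟩ hskip
      · rw [if_neg h, hg a b]
        by_cases h2 : (a < i ∧ b < N) ∨ (a = i ∧ b < m)
        · rw [if_pos h2, if_pos (by omega : (a < i ∧ b < N) ∨ (a = i ∧ b < m + 1))]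
        · rw [if_neg h2, if_neg (by omega : ¬((a < i ∧ b < N) ∨ (a = i ∧ b < m + 1)))]

lemma b_outer_inv (X : List (List Int)) (N : Nat)
    (hX : N ≤ X.length ∧ ∀ a < N, N ≤ (X.getD a []).length) (k : Nat) (hk : k ≤ N) :
    shapeEq ((List.range k).foldl (fun Y i =>
    (List.range N).foldl (fun Y j =>
      if i = 0 ∧ j = 0 then Y
      else
        let v := g2 Y i j
        let v := if 0 < i then max v (g2 Y (i - 1) j) else v
        let v := if 0 < j then max v (g2 Y i (j - 1)) else v
        s2 Y i j v) Y) X) X ∧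
    ∀ a b, g2 ((List.range k).foldl (fun Y i =>
    (List.range N).foldl (fun Y j =>
      if i = 0 ∧ j = 0 then Y
      else
        let v := g2 Y i j
        let v := if 0 < i then max v (g2 Y (i - 1) j) else v
        let v := if 0 < j then max v (g2 Y i (j - 1)) else v
        s2 Y i j v) Y) X) a b =
      if a < k ∧ b < N then pm (g2 X) a b else g2 X a b := by
  induction k with
  | zero => exact ⟨shapeEq_refl X, fun a b => by simp⟩
  | succ k ih =>
    obtain ⟨hs, hg⟩ := ih (by omega)
    simp only [List.range_succ, List.foldl_append, List.foldl_cons, List.foldl_nil]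
    obtain ⟨hs2, hg2⟩ := b_inner_inv X _ N k hX hs (by omega) hg N le_rfl
    refine ⟨hs2, fun a b => ?_⟩
    rw [hg2 a b]
    by_cases h : (a < k ∧ b < N) ∨ (a = k ∧ b < N)
    · rw [if_pos h, if_pos (by omega : a < k + 1 ∧ b < N)]
    · rw [if_neg h, if_neg (by omega : ¬(a < k + 1 ∧ b < N))]

lemma bNat_char (X : List (List Int)) (N : Nat)
    (hX : N ≤ X.length ∧ ∀ a < N, N ≤ (X.getD a []).length) :
    shapeEq (bNat X N) X ∧ ∀ a b, g2 (bNat X N) a b =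
      if a < N ∧ b < N then pm (g2 X) a b else g2 X a b := by
  exact b_outer_inv X N hX N le_rfl

-- for n = 1 both programs touch no cell: A's loops over range(n-1) are empty and its second
-- sweep's inner loop is empty; B skips the single cell (0,0).
lemma aNat_one (X : List (List Int)) : aNat X 1 = X := by
  simp [aNat, List.range_one]

lemma bNat_one (X : List (List Int)) : bNat X 1 = X := by
  simp [bNat, List.range_one]

-- ===== assembly =====

lemma eq_of_shape_g2 (Y Z : List (List Int)) (h1 : Y.length = Z.length)
    (h2 : ∀ a, (Y.getD a []).length = (Z.getD a []).length)
    (h3 : ∀ a b, g2 Y a b = g2 Z a b) : Y = Z := by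
  apply List.ext_getElem h1
  intro a ha1 ha2
  apply List.ext_getElem
  · have := h2 a
    rwa [List.getD_eq_getElem Y [] ha1, List.getD_eq_getElem Z [] ha2] at this
  · intro b hb1 hb2
    have := h3 a b
    unfold g2 at this
    rwa [List.getD_eq_getElem Y [] ha1, List.getD_eq_getElem Z [] ha2,
      List.getD_eq_getElem _ _ hb1, List.getD_eq_getElem _ _ hb2] at this

-- ===== VERDICT (by name: the statement is the Claim_ definition above) =====
theorem accum_max_spec : Claim_equal_accum_max := by
  intro X n _ hpre
  unfold Spec_accum_max
  rw [port_a_eq, port_b_eq]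
  rcases hpre with hle | ⟨h1, h2⟩
  · by_cases h0 : n ≤ 0
    · have hN : n.toNat = 0 := by omega
      simp [hN, aNat, bNat]
    · have hN : n.toNat = 1 := by omega
      rw [hN, aNat_one, bNat_one]
  · set N := n.toNat with hNdef
    have hX : N ≤ X.length ∧ ∀ a < N, N ≤ (X.getD a []).length := by
      constructor
      · omega
      · intro a ha
        have haL : a < X.length := by omega
        have hta : a < (X.take N).length := by simp [List.length_take]; omega
        have : X.getD a [] ∈ X.take N := by
          rw [List.getD_eq_getElem X [] haL]
          have he : (X.take N)[a]'hta = X[a]'haL := List.getElem_take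
          exact he ▸ List.getElem_mem hta
        have := h2 _ this
        omega
    by_cases hN : 1 ≤ N
    · obtain ⟨hsa, hga⟩ := aNat_char X N hX hN
      obtain ⟨hsb, hgb⟩ := bNat_char X N hX
      exact eq_of_shape_g2 _ _ (hsa.1.trans hsb.1.symm)
        (fun a => (hsa.2 a).trans (hsb.2 a).symm)
        (fun a b => (hga a b).trans (hgb a b).symm)
    · have : N = 0 := by omega
      simp [this, aNat, bNat]
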